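-- pv_equiv track=rewrite | github.com/ZigaOpara/Advent-of-code | 2021/day_3.py | find_most_common_bits
-- ===== SOURCE A (Python) =====
-- def find_most_common_bits(input):
--     result = ''
--     for index in range(len(input[0])):
--         zero = 0
--         one = 0
--         for line in input:
--             if line[index] == '0':
--                 zero += 1
--             else:
--                 one += 1
--         if zero > one:
--             result += '0'
--         else:
--             result += '1'
--     return result
-- ===== SOURCE B (Python) =====
-- def find_most_common_bits(input):
--     width = len(input[0])
--     zeros = [0] * width
--     for line in input:
--         zeros = [z + (1 if line[i] == '0' else 0) for i, z in enumerate(zeros)]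
--     n = len(input)
--     return ''.join('0' if 2 * z > n else '1' for z in zeros)
-- ===== Notes on version B (the rewrite author's own statement) =====
-- stated objective: alternative
-- what changed: Instead of re-scanning all lines for each column (column-major nested loops counting zero/one), B makes one line-major pass maintaining a vector of per-column zero-counts, then emits the result in a separate pass from the counts using the rule 2*zeros > n -> '0' else '1'.
import Mathlib
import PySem

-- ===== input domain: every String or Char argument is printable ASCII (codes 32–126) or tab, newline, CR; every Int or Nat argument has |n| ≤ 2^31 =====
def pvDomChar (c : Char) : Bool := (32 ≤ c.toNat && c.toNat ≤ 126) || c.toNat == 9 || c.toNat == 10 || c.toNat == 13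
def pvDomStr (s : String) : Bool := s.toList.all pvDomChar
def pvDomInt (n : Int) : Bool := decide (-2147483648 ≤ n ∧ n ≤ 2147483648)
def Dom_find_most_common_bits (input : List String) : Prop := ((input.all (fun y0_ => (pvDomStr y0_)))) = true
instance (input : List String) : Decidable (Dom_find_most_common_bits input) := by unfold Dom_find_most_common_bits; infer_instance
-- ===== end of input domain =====

-- B replaces A's column-major nested recount by one line-major pass over a vector of
-- per-column zero-counts plus a separate output pass (same asymptotic cost, different traversal).

-- ===== PORT A =====
def find_most_common_bits (input : List String) : String :=
  (PySem.List.pyRange 0 (PySem.Str.len (input.headD "")) 1).foldl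
    (fun result index =>
      let zo : Int × Int := input.foldl
        (fun (zo : Int × Int) line =>
          if PySem.Str.pyGet? line index = some '0' then (zo.1 + 1, zo.2) else (zo.1, zo.2 + 1))
        (0, 0)
      if zo.1 > zo.2 then result ++ "0" else result ++ "1")
    ""

-- ===== PORT B =====
def find_most_common_bits_alt (input : List String) : String :=
  let width := PySem.Str.len (input.headD "")
  let zeros0 : List Int := PySem.List.pyRepeat [(0 : Int)] width
  let zeros := input.foldl
    (fun zs line =>
      (PySem.List.enumerate zs 0).map
        (fun iz => iz.2 + (if PySem.Str.pyGet? line iz.1 = some '0' then 1 else 0)))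
    zeros0
  let n : Int := input.length
  PySem.Str.join "" (zeros.map (fun z => if 2 * z > n then "0" else "1"))

-- ===== PRECONDITION & SPEC =====
-- Pre_ excludes exactly the inputs where Python A raises IndexError: empty input
-- (input[0]) and ragged input where some line is shorter than the first line (line[index]).
def Pre_find_most_common_bits (input : List String) : Prop :=
  input ≠ [] ∧ ∀ s ∈ input, PySem.Str.len (input.headD "") ≤ PySem.Str.len s
instance (input : List String) : Decidable (Pre_find_most_common_bits input) := by
  unfold Pre_find_most_common_bits; infer_instance
def pvWitness_find_most_common_bits : List String := ["011", "100", "101"]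

def Spec_find_most_common_bits (input : List String) (out : String) : Prop := out = find_most_common_bits_alt input
instance (input : List String) (out : String) : Decidable (Spec_find_most_common_bits input out) := by unfold Spec_find_most_common_bits; infer_instance

-- ===== CLAIM (what is proved, stated in full; the proofs are below) =====
def Claim_equal_find_most_common_bits : Prop := ∀ (input : List String), Dom_find_most_common_bits input → Pre_find_most_common_bits input → Spec_find_most_common_bits input (find_most_common_bits input)

-- ===== LEMMAS AND PROOFS =====

-- number of lines whose character at index i is '0'
def pvCnt (input : List String) (i : Int) : Int :=
  (input.countP (fun line => PySem.Str.pyGet? line i == some '0') : Nat)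

lemma pvCnt_nil (i : Int) : pvCnt [] i = 0 := rfl

lemma pvCnt_cons (l : String) (ls : List String) (i : Int) :
    pvCnt (l :: ls) i
      = (if PySem.Str.pyGet? l i = some '0' then (1 : Int) else 0) + pvCnt ls i := by
  unfold pvCnt
  rw [List.countP_cons]
  by_cases h : PySem.Str.pyGet? l i = some '0'
  · rw [if_pos (by exact beq_iff_eq.mpr h), if_pos h]; push_cast; ring
  · rw [if_neg (by exact fun hc => h (beq_iff_eq.mp hc)), if_neg h]; push_cast; ring

-- A's inner loop computes (zeros, ones) = (a + cnt, b + (len - cnt))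
lemma innerA (i : Int) : ∀ (ls : List String) (a b : Int),
    ls.foldl
      (fun (zo : Int × Int) line =>
        if PySem.Str.pyGet? line i = some '0' then (zo.1 + 1, zo.2) else (zo.1, zo.2 + 1))
      (a, b)
    = (a + pvCnt ls i, b + ((ls.length : Int) - pvCnt ls i)) := by
  intro ls
  induction ls with
  | nil => intro a b; simp [pvCnt_nil]
  | cons l ls ih =>
    intro a b
    simp only [List.foldl_cons]
    rw [pvCnt_cons]
    by_cases h : PySem.Str.pyGet? l i = some '0'
    · rw [if_pos h, if_pos h, ih]
      simp only [Prod.mk.injEq, List.length_cons]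
      constructor <;> (push_cast; ring)
    · rw [if_neg h, if_neg h, ih]
      simp only [Prod.mk.injEq, List.length_cons]
      constructor <;> (push_cast; ring)

-- A's outer loop appends one character per index
lemma foldlStrIfNat (c : Nat → Prop) [DecidablePred c] : ∀ (l : List Nat) (acc : String),
    (l.foldl (fun r j => if c j then r ++ "0" else r ++ "1") acc).toList
      = acc.toList ++ l.map (fun j => if c j then '0' else '1') := by
  intro l
  induction l with
  | nil => intro acc; simp
  | cons x xs ih =>
    intro acc
    by_cases h : c x <;> simp [h, ih]

lemma pyRange_zero_nat_map (n : Nat) :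
    PySem.List.pyRange 0 (n : Int) 1 = (List.range n).map (fun (k : Nat) => (k : Int)) := by
  rw [PySem.List.pyRange_zero_natCast]

-- B's per-line update on a range-shaped vector
lemma stepB (line : String) : ∀ (w : Nat) (f : Nat → Int) (s : Int),
    (PySem.List.enumerate ((List.range w).map f) s).map
        (fun iz => iz.2 + (if PySem.Str.pyGet? line iz.1 = some '0' then 1 else 0))
      = (List.range w).map
          (fun j => f j + (if PySem.Str.pyGet? line (s + (j : Nat)) = some '0' then 1 else 0)) := by
  intro w
  induction w with
  | zero => intro f s; simp
  | succ w ih =>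
    intro f s
    rw [List.range_succ_eq_map, List.map_cons, List.map_map, PySem.List.enumerate_cons,
      List.map_cons, List.map_cons, List.map_map]
    rw [ih (f ∘ Nat.succ) (s + 1)]
    congr 1
    · norm_num
    · apply List.map_congr_left
      intro j _
      simp only [Function.comp]
      have h1 : s + 1 + (j : Int) = s + ((j : Nat) + 1 : Nat) := by push_cast; ring
      rw [h1]

-- B's fold over the lines accumulates pvCnt pointwise
lemma foldB : ∀ (ls : List String) (w : Nat) (f : Nat → Int),
    ls.foldl
      (fun zs line =>
        (PySem.List.enumerate zs 0).map
          (fun iz => iz.2 + (if PySem.Str.pyGet? line iz.1 = some '0' then 1 else 0)))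
      ((List.range w).map f)
    = (List.range w).map (fun j => f j + pvCnt ls ((j : Nat) : Int)) := by
  intro ls
  induction ls with
  | nil => intro w f; simp [pvCnt_nil]
  | cons l ls ih =>
    intro w f
    simp only [List.foldl_cons]
    rw [stepB l w f 0, ih]
    apply List.map_congr_left
    intro j _
    rw [pvCnt_cons]
    simp only [zero_add]
    ring

set_option maxHeartbeats 2000000 in
lemma portA_chars (input : List String) :
    (find_most_common_bits input).toList
      = (List.range (input.headD "").toList.length).map
          (fun (k : Nat) => if 2 * pvCnt input (k : Int) > (input.length : Int) then '0' else '1') := by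
  have hL : PySem.Str.len (input.headD "") = ((input.headD "").toList.length : Int) := by
    simp [PySem.Str.len_eq]
  unfold find_most_common_bits
  rw [hL, pyRange_zero_nat_map, List.foldl_map]
  have hclose : "".toList ++ (List.range (input.headD "").toList.length).map
      (fun (k : Nat) => if (input.foldl
          (fun (zo : Int × Int) line =>
            if PySem.Str.pyGet? line (k : Int) = some '0' then (zo.1 + 1, zo.2)
            else (zo.1, zo.2 + 1)) (0, 0)).1 > (input.foldl
          (fun (zo : Int × Int) line =>
            if PySem.Str.pyGet? line (k : Int) = some '0' then (zo.1 + 1, zo.2)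
            else (zo.1, zo.2 + 1)) (0, 0)).2 then '0' else '1')
    = (List.range (input.headD "").toList.length).map
        (fun (k : Nat) => if 2 * pvCnt input (k : Int) > (input.length : Int)
          then '0' else '1') := by
    have h0 : "".toList = ([] : List Char) := rfl
    rw [h0, List.nil_append]
    apply List.map_congr_left
    intro k _
    rw [innerA ((k : Nat) : Int) input 0 0]
    split_ifs with h1 h2 <;> first | rfl | omega
  exact (foldlStrIfNat
      (fun k => (input.foldl
          (fun (zo : Int × Int) line =>
            if PySem.Str.pyGet? line (k : Int) = some '0' then (zo.1 + 1, zo.2)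
            else (zo.1, zo.2 + 1)) (0, 0)).1 > (input.foldl
          (fun (zo : Int × Int) line =>
            if PySem.Str.pyGet? line (k : Int) = some '0' then (zo.1 + 1, zo.2)
            else (zo.1, zo.2 + 1)) (0, 0)).2)
      (List.range (input.headD "").toList.length) "").trans hclose

set_option maxHeartbeats 2000000 in
lemma portB_chars (input : List String) :
    (find_most_common_bits_alt input).toList
      = (List.range (input.headD "").toList.length).map
          (fun (k : Nat) => if 2 * pvCnt input (k : Int) > (input.length : Int) then '0' else '1') := by
  have hL : PySem.Str.len (input.headD "") = ((input.headD "").toList.length : Int) := by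
    simp [PySem.Str.len_eq]
  show (PySem.Str.join ""
      ((input.foldl
          (fun zs line =>
            (PySem.List.enumerate zs 0).map
              (fun iz => iz.2 + (if PySem.Str.pyGet? line iz.1 = some '0' then 1 else 0)))
          (PySem.List.pyRepeat [(0 : Int)] (PySem.Str.len (input.headD "")))).map
        (fun z => if 2 * z > (input.length : Int) then "0" else "1"))).toList
    = (List.range (input.headD "").toList.length).map
        (fun (k : Nat) => if 2 * pvCnt input (k : Int) > (input.length : Int) then '0' else '1')
  rw [hL, PySem.List.pyRepeat_singleton, Int.toNat_natCast]
  have hrep : List.replicate (input.headD "").toList.length (0 : Int)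
      = (List.range (input.headD "").toList.length).map (fun _ => 0) := by
    simp [List.map_const']
  rw [hrep, foldB input (input.headD "").toList.length (fun _ => 0)]
  rw [PySem.Str.toList_join, List.map_map, List.map_map]
  have hfun : ((String.toList ∘ fun z => if 2 * z > (input.length : Int) then "0" else "1") ∘
        (fun j : Nat => 0 + pvCnt input (j : Int))) =
      (fun c => [c]) ∘
        (fun (k : Nat) => if 2 * pvCnt input (k : Int) > (input.length : Int)
          then '0' else '1') := by
    funext j
    simp only [Function.comp, zero_add]
    split_ifs <;> rfl
  have h0 : "".toList = ([] : List Char) := rfl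
  rw [h0, hfun, ← List.map_map, PySem.Chars.join_nil_singletons]

theorem find_most_common_bits_eq (input : List String) :
    find_most_common_bits input = find_most_common_bits_alt input := by
  apply String.ext
  show (find_most_common_bits input).toList = (find_most_common_bits_alt input).toList
  rw [portA_chars, portB_chars]

-- ===== VERDICT (by name: the statement is the Claim_ definition above) =====
theorem find_most_common_bits_spec : Claim_equal_find_most_common_bits := by
  intro input _ _
  unfold Spec_find_most_common_bits
  exact find_most_common_bits_eq input
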